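-- pv_equiv track=rewrite | github.com/need-singularity/sylvian-singularity | calc/theta_perfect_pattern.py | r_squares_fast
-- ===== SOURCE A (Python) =====
-- def r_squares_fast(d, n_max):
--     """Compute r_d(n) for n=0..n_max using generating function (theta_3 power).
--     Returns list of coefficients.
--     """
--     # theta_3(q) = sum_{m=-inf}^{inf} q^{m^2} = 1 + 2*sum_{m=1}^{inf} q^{m^2}
--     # r_d(n) = coefficient of q^n in theta_3(q)^d
--
--     # Start with theta_3 coefficients up to q^n_max
--     theta = [0] * (n_max + 1)
--     theta[0] = 1
--     m = 1
--     while m * m <= n_max: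
--         theta[m * m] += 2
--         m += 1
--
--     # Raise to d-th power by repeated convolution
--     result = [0] * (n_max + 1)
--     result[0] = 1  # Start with 1 (0th power)
--
--     for _ in range(d):
--         new_result = [0] * (n_max + 1)
--         for i in range(n_max + 1):
--             if result[i] == 0:
--                 continue
--             for j in range(n_max + 1 - i):
--                 if theta[j] == 0:
--                     continue
--                 new_result[i + j] += result[i] * theta[j]
--         result = new_result
--
--     return result
-- ===== SOURCE B (Python) =====
-- def r_squares_fast(d, n_max):
--     """Compute r_d(n) for n=0..n_max: iterate d pull-convolutions where each new
--     coefficient is gathered as new[n] = prev[n] + 2*sum(prev[n-m*m] for m>=1, m*m<=n),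
--     i.e. the theta_3 series is never materialised and only O(sqrt(n)) terms per
--     coefficient are read."""
--     def step(prev):
--         out = []
--         for n in range(n_max + 1):
--             s = prev[n]
--             m = 1
--             while m * m <= n:
--                 s += 2 * prev[n - m * m]
--                 m += 1
--             out.append(s)
--         return out
--     result = [1] + [0] * n_max
--     for _ in range(d):
--         result = step(result)
--     return result
-- ===== Notes on version B (the rewrite author's own statement) =====
-- stated objective: faster
-- what changed: B never builds the theta coefficient array and never scatters into a mutable result: each of the d passes gathers every output coefficient directly as new[n] = prev[n] + 2*sum of prev[n-m^2] over m^2<=n, appending to a fresh list, so each pass costs O(n*sqrt(n)) instead of A's O(n^2) scatter convolution.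
import Mathlib
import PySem

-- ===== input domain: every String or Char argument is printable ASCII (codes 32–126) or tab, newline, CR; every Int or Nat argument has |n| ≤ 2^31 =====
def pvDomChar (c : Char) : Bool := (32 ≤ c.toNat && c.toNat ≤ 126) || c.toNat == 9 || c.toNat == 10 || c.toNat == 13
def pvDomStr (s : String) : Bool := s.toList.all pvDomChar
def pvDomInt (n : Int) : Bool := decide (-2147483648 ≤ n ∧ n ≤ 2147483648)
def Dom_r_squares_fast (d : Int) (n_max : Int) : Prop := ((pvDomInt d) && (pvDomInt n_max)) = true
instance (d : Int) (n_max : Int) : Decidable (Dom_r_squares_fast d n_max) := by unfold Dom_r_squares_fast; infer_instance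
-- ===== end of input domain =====

-- B replaces A's scatter convolution with a materialised theta array by d gather
-- passes that read only the O(sqrt n) square offsets per coefficient; measurably
-- faster (asymptotic).


-- ===== PORT A =====
-- 'l[i] += v' on a list (all indices reached below are in range on Pre_)
def updAdd (l : List Int) (i : Nat) (v : Int) : List Int := l.set i (l.getD i 0 + v)

-- 'm = 1; while m*m <= n_max: theta[m*m] += 2; m += 1'
def thetaLoop (N : Nat) (t : List Int) (m : Nat) : List Int :=
  if _h : m * m ≤ N then thetaLoop N (updAdd t (m * m) 2) (m + 1) else t
termination_by N + 1 - m
decreasing_by rcases Nat.eq_zero_or_pos m with h0 | h0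
              · omega
              · have : m ≤ m * m := Nat.le_mul_of_pos_left m h0; omega

-- the body of 'for _ in range(d)': one scatter pass i, j (zero entries skipped)
def innerA (theta : List Int) (N : Nat) (result : List Int) : List Int :=
  (List.range (N + 1)).foldl (fun new i =>
      if result.getD i 0 = 0 then new
      else
        (List.range (N + 1 - i)).foldl (fun nw j =>
            if theta.getD j 0 = 0 then nw
            else updAdd nw (i + j) (result.getD i 0 * theta.getD j 0)) new)
    (List.replicate (N + 1) 0)

def r_squares_fast (d : Int) (n_max : Int) : List Int :=
  let N := n_max.toNat
  let theta := thetaLoop N ((List.replicate (N + 1) (0 : Int)).set 0 1) 1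
  (PySem.List.pyRange 0 d 1).foldl (fun result _ => innerA theta N result)
    ((List.replicate (N + 1) (0 : Int)).set 0 1)

-- ===== PORT B =====
-- 's = prev[n]; m = 1; while m*m <= n: s += 2*prev[n-m*m]; m += 1'
def gatherLoop (prev : List Int) (n : Nat) (s : Int) (m : Nat) : Int :=
  if _h : m * m ≤ n then gatherLoop prev n (s + 2 * prev.getD (n - m * m) 0) (m + 1) else s
termination_by n + 1 - m
decreasing_by rcases Nat.eq_zero_or_pos m with h0 | h0
              · omega
              · have : m ≤ m * m := Nat.le_mul_of_pos_left m h0; omega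

-- 'def step(prev): out = []; for n in range(n_max+1): … out.append(s); return out'
def stepB (N : Nat) (prev : List Int) : List Int :=
  (List.range (N + 1)).foldl (fun out n => out ++ [gatherLoop prev n (prev.getD n 0) 1]) []

def r_squares_fast_alt (d : Int) (n_max : Int) : List Int :=
  let N := n_max.toNat
  (PySem.List.pyRange 0 d 1).foldl (fun result _ => stepB N result) (1 :: List.replicate N 0)

-- ===== PRECONDITION & SPEC =====
-- A raises IndexError ('theta[0] = 1' on an empty list) iff n_max < 0.
def Pre_r_squares_fast (d : Int) (n_max : Int) : Prop := 0 ≤ n_max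
instance (d : Int) (n_max : Int) : Decidable (Pre_r_squares_fast d n_max) := by
  unfold Pre_r_squares_fast; infer_instance
def pvWitness_r_squares_fast : Int × Int := (3, 7)

def Spec_r_squares_fast (d : Int) (n_max : Int) (out : List Int) : Prop := out = r_squares_fast_alt d n_max
instance (d : Int) (n_max : Int) (out : List Int) : Decidable (Spec_r_squares_fast d n_max out) := by unfold Spec_r_squares_fast; infer_instance

-- ===== CLAIM (what is proved, stated in full; the proofs are below) =====
def Claim_equal_r_squares_fast : Prop := ∀ (d : Int) (n_max : Int), Dom_r_squares_fast d n_max → Pre_r_squares_fast d n_max → Spec_r_squares_fast d n_max (r_squares_fast d n_max)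

-- ===== LEMMAS AND PROOFS =====

-- bridges between Mathlib's `^ 2` sqrt lemmas and the `m * m` form the ports use
theorem sqrt_mul_le (n : Nat) : Nat.sqrt n * Nat.sqrt n ≤ n := by
  simpa [pow_two] using Nat.sqrt_le' n

theorem le_sqrt_iff' (m n : Nat) : m ≤ Nat.sqrt n ↔ m * m ≤ n := by
  simpa [pow_two] using Nat.le_sqrt'

theorem sqrt_lt_iff' (m n : Nat) : Nat.sqrt n < m ↔ n < m * m := by
  simpa [pow_two] using Nat.sqrt_lt'

theorem sqrt_self_mul (m : Nat) : Nat.sqrt (m * m) = m := by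
  simpa [pow_two] using Nat.sqrt_eq' m

theorem length_updAdd (l : List Int) (i : Nat) (v : Int) : (updAdd l i v).length = l.length := by
  simp [updAdd]

theorem getD_updAdd (l : List Int) (i j : Nat) (v : Int) (hi : i < l.length) :
    (updAdd l i v).getD j 0 = l.getD j 0 + if j = i then v else 0 := by
  rcases eq_or_ne j i with rfl | h
  · simp [updAdd, List.getD_eq_getElem?_getD, hi]
  · simp [updAdd, List.getD_eq_getElem?_getD, List.getElem?_set_ne (by omega : i ≠ j), h]

theorem getD_thetaLoop (N j : Nat) (t : List Int) (m : Nat) :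
    t.length = N + 1 →
    (thetaLoop N t m).getD j 0 =
      t.getD j 0 + if m ≤ Nat.sqrt j ∧ Nat.sqrt j * Nat.sqrt j = j ∧ j ≤ N then 2 else 0 := by
  fun_induction thetaLoop with
  | case1 t m h ih =>
    intro ht
    rw [ih (by rw [length_updAdd]; exact ht),
        getD_updAdd t (m * m) j 2 (by omega)]
    rcases eq_or_ne j (m * m) with rfl | hne
    · have hs : Nat.sqrt (m * m) = m := sqrt_self_mul m
      simp only [hs, if_true, true_and]
      split_ifs <;> omega
    · rw [if_neg hne]
      have hiff : (m + 1 ≤ Nat.sqrt j ∧ Nat.sqrt j * Nat.sqrt j = j ∧ j ≤ N) ↔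
             (m ≤ Nat.sqrt j ∧ Nat.sqrt j * Nat.sqrt j = j ∧ j ≤ N) := by
        constructor
        · rintro ⟨h1, h2, h3⟩; exact ⟨by omega, h2, h3⟩
        · rintro ⟨h1, h2, h3⟩
          refine ⟨?_, h2, h3⟩
          rcases Nat.eq_or_lt_of_le h1 with he | hl
          · have hj : m * m = j := by rw [he]; exact h2
            exact absurd hj.symm hne
          · omega
      rw [if_congr hiff rfl rfl]; ring
  | case2 t m h =>
    intro _ht
    rw [if_neg, add_zero]
    rintro ⟨h1, h2, h3⟩
    have hmm : m * m ≤ Nat.sqrt j * Nat.sqrt j := Nat.mul_le_mul h1 h1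
    have := sqrt_mul_le j
    omega

-- the built theta, characterised entrywise
theorem getD_theta (N j : Nat) :
    (thetaLoop N ((List.replicate (N + 1) (0 : Int)).set 0 1) 1).getD j 0 =
      if j = 0 then 1 else if Nat.sqrt j * Nat.sqrt j = j ∧ j ≤ N then 2 else 0 := by
  rw [getD_thetaLoop N j _ 1 (by simp)]
  rcases eq_or_ne j 0 with rfl | hj
  · simp [List.getD_eq_getElem?_getD]
  · have hinit : (List.replicate (N + 1) (0 : Int)).set 0 1 = 1 :: List.replicate N 0 := by
      simp [List.replicate_succ]
    have h0 : ((List.replicate (N + 1) (0 : Int)).set 0 1).getD j 0 = 0 := by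
      rw [hinit]
      rcases j with _ | j
      · omega
      · rw [List.getD_cons_succ]
        simp [List.getD_eq_getElem?_getD, List.getElem?_replicate]
        split <;> rfl
    rw [h0, zero_add]
    have h1 : 1 ≤ Nat.sqrt j := (le_sqrt_iff' 1 j).mpr (by omega)
    rw [if_neg hj]
    by_cases hsq : Nat.sqrt j * Nat.sqrt j = j ∧ j ≤ N
    · rw [if_pos ⟨h1, hsq.1, hsq.2⟩, if_pos hsq]
    · rw [if_neg (by tauto), if_neg hsq]

-- skipping zero entries is a fold over the filtered list
theorem foldl_skip {α : Type} (t : α → Int) (g : List Int → α → List Int) (l : List α) :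
    ∀ acc : List Int,
      l.foldl (fun nw x => if t x = 0 then nw else g nw x) acc =
        (l.filter (fun x => decide (¬ t x = 0))).foldl g acc := by
  induction l with
  | nil => intro acc; rfl
  | cons x xs ih =>
    intro acc
    by_cases hx : t x = 0 <;> simp [List.filter_cons, hx, ih]

-- the set of square indices below K, as an explicit list of squares
theorem filter_sq_range (K : Nat) (hK : 1 ≤ K) :
    (List.range K).filter (fun j => decide (Nat.sqrt j * Nat.sqrt j = j)) =
      (List.range (Nat.sqrt (K - 1) + 1)).map (fun m => m * m) := by
  induction K with
  | zero => omega
  | succ K ih =>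
    rcases Nat.eq_zero_or_pos K with rfl | hK1
    · decide
    rw [List.range_succ, List.filter_append, ih hK1]
    simp only [List.filter_cons, List.filter_nil]
    by_cases hsq : Nat.sqrt K * Nat.sqrt K = K
    · obtain ⟨s, hs⟩ : ∃ s, Nat.sqrt K = s + 1 := by
        have h1 : 1 ≤ Nat.sqrt K := (le_sqrt_iff' 1 K).mpr (by omega)
        exact ⟨Nat.sqrt K - 1, by omega⟩
      have hKval : K = s * s + 2 * s + 1 := by rw [← hsq, hs]; ring
      have hKm : Nat.sqrt (K - 1) = s := by
        have h1 : s ≤ Nat.sqrt (K - 1) := (le_sqrt_iff' _ _).mpr (by omega)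
        have hsq1 : (s + 1) * (s + 1) = s * s + 2 * s + 1 := by ring
        have h2 : Nat.sqrt (K - 1) < s + 1 := (sqrt_lt_iff' _ _).mpr (by omega)
        omega
      have hKs : Nat.sqrt (K + 1 - 1) = s + 1 := by simpa using hs
      have hKe : K = (s + 1) * (s + 1) := by rw [← hsq, hs]
      rw [hKm, hKs]
      simp [hsq, ← hKe, List.range_succ]
    · have hKm : Nat.sqrt (K - 1) = Nat.sqrt K := by
        have h1 : Nat.sqrt K * Nat.sqrt K ≤ K := sqrt_mul_le K
        have h2 : Nat.sqrt K ≤ Nat.sqrt (K - 1) := (le_sqrt_iff' _ _).mpr (by omega)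
        have h3 : Nat.sqrt (K - 1) ≤ Nat.sqrt K := Nat.sqrt_le_sqrt (by omega)
        omega
      have hKs : Nat.sqrt (K + 1 - 1) = Nat.sqrt K := by simp
      rw [hKm, hKs]
      simp [hsq]

-- nested conditional scatter folds, flattened into one list of (position, value) pairs
def pairsList (theta r : List Int) (N : Nat) : List (Nat × Int) :=
  ((List.range (N + 1)).filter (fun i => decide (¬ r.getD i 0 = 0))).flatMap
    (fun i => ((List.range (N + 1 - i)).filter (fun j => decide (¬ theta.getD j 0 = 0))).map
      (fun j => (i + j, r.getD i 0 * theta.getD j 0)))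

theorem foldl_flatMap {α β γ : Type} (l : List α) (f : α → List β) (g : γ → β → γ) (init : γ) :
    (l.flatMap f).foldl g init = l.foldl (fun acc x => (f x).foldl g acc) init := by
  induction l generalizing init with
  | nil => rfl
  | cons x xs ih => simp [List.flatMap_cons, List.foldl_append, ih]

theorem innerA_eq_pairs (theta r : List Int) (N : Nat) :
    innerA theta N r =
      (pairsList theta r N).foldl (fun a p => updAdd a p.1 p.2)
        (List.replicate (N + 1) 0) := by
  unfold innerA pairsList
  rw [foldl_skip (fun i => r.getD i 0), foldl_flatMap]
  apply PySem.List.foldl_congr_mem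
  intro acc i _
  rw [foldl_skip (fun j => theta.getD j 0), List.foldl_map]

theorem length_foldl_updAdd (l : List (Nat × Int)) (acc : List Int) :
    (l.foldl (fun a p => updAdd a p.1 p.2) acc).length = acc.length := by
  induction l generalizing acc with
  | nil => rfl
  | cons x xs ih => rw [List.foldl_cons, ih, length_updAdd]

-- scatter sum: entry k of a fold of updAdds is the sum of the values aimed at k
theorem getD_foldl_updAdd (l : List (Nat × Int)) (k : Nat) :
    ∀ acc : List Int, (∀ p ∈ l, p.1 < acc.length) →
      (l.foldl (fun a p => updAdd a p.1 p.2) acc).getD k 0 =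
        acc.getD k 0 + ((l.filter (fun p => decide (p.1 = k))).map Prod.snd).sum := by
  induction l with
  | nil => intro acc _; simp
  | cons p ps ih =>
    intro acc hpos
    rw [List.foldl_cons, ih _ (by intro q hq; rw [length_updAdd]; exact hpos q (by simp [hq])),
        getD_updAdd acc p.1 k p.2 (hpos p (by simp))]
    by_cases hk : p.1 = k
    · subst hk; simp [List.filter_cons]; ring
    · simp [List.filter_cons, hk, Ne.symm hk]

-- (range K).filter (· = c)
theorem filter_range_eq_single (K c : Nat) :
    (List.range K).filter (fun j => decide (j = c)) = if c < K then [c] else [] := by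
  induction K with
  | zero => simp
  | succ K ih =>
    rw [List.range_succ, List.filter_append, ih]
    by_cases hc : K = c
    · subst hc
      rw [if_neg (Nat.lt_irrefl K), if_pos (Nat.lt_succ_self K)]
      simp
    · have h1 : List.filter (fun j => decide (j = c)) [K] = [] := by simp [hc]
      rw [h1, List.append_nil]
      by_cases hlt : c < K
      · rw [if_pos hlt, if_pos (by omega)]
      · rw [if_neg hlt, if_neg (by omega)]

-- (range K).filter (i + · = k)
theorem filter_range_add_eq (K i k : Nat) :
    (List.range K).filter (fun j => decide (i + j = k)) =
      if i ≤ k ∧ k - i < K then [k - i] else [] := by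
  by_cases hik : i ≤ k
  · rw [List.filter_congr (q := fun j => decide (j = k - i))
        (by intro j _; exact decide_eq_decide.mpr (by omega)),
      filter_range_eq_single]
    by_cases h : k - i < K
    · rw [if_pos h, if_pos ⟨hik, h⟩]
    · rw [if_neg h, if_neg (by tauto)]
  · rw [List.filter_eq_nil_iff.mpr (by intro j _; simp; omega), if_neg (by tauto)]

theorem sum_flatMap_own {α : Type} (l : List α) (f : α → List Int) :
    (l.flatMap f).sum = (l.map (fun x => (f x).sum)).sum := by
  induction l with
  | nil => rfl
  | cons x xs ih => simp [List.flatMap_cons, ih]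

theorem sum_map_ite_filter {α : Type} (l : List α) (c : α → Prop) [DecidablePred c] (f : α → Int) :
    (l.map (fun x => if c x then f x else 0)).sum =
      ((l.filter (fun x => decide (c x))).map f).sum := by
  induction l with
  | nil => rfl
  | cons x xs ih => by_cases hx : c x <;> simp [List.filter_cons, hx, ih]

-- list sum over range ↔ Finset sum, for the reflection step
theorem sum_map_range_finset (f : Nat → Int) (K : Nat) :
    ((List.range K).map f).sum = ∑ i ∈ Finset.range K, f i := by
  induction K with
  | zero => rfl
  | succ K ih => rw [List.range_succ, Finset.sum_range_succ, List.map_append, List.sum_append, ih]; simp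

theorem sum_map_range_reflect (f : Nat → Int) (K : Nat) :
    ((List.range (K + 1)).map f).sum = ((List.range (K + 1)).map (fun j => f (K - j))).sum := by
  rw [sum_map_range_finset, sum_map_range_finset,
      ← Finset.sum_range_reflect (fun j => f (K - j)) (K + 1)]
  apply Finset.sum_congr rfl
  intro x hx
  rw [Finset.mem_range] at hx
  congr 1
  omega

-- entry k of A's pass equals the convolution sum over offsets j
theorem getD_innerA (N k : Nat) (r : List Int) (hr : r.length = N + 1) (hk : k ≤ N) :
    (innerA (thetaLoop N ((List.replicate (N + 1) (0 : Int)).set 0 1) 1) N r).getD k 0 =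
      ((List.range (k + 1)).map (fun j =>
        r.getD (k - j) 0 *
          (thetaLoop N ((List.replicate (N + 1) (0 : Int)).set 0 1) 1).getD j 0)).sum := by
  set θ := thetaLoop N ((List.replicate (N + 1) (0 : Int)).set 0 1) 1 with hθ
  have hbound : ∀ p ∈ pairsList θ r N, p.1 < (List.replicate (N + 1) (0 : Int)).length := by
    intro p hp
    simp only [pairsList, List.mem_flatMap, List.mem_map, List.mem_filter, List.mem_range] at hp
    obtain ⟨i, ⟨hi, -⟩, j, ⟨⟨hj, -⟩, rfl⟩⟩ := hp
    simp only [List.length_replicate]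
    omega
  rw [innerA_eq_pairs, getD_foldl_updAdd _ k _ hbound]
  have hacc : (List.replicate (N + 1) (0 : Int)).getD k 0 = 0 := by
    rw [List.getD_eq_getElem?_getD, List.getElem?_replicate]
    split <;> rfl
  rw [hacc, zero_add]
  unfold pairsList
  rw [List.filter_flatMap, List.map_flatMap, sum_flatMap_own]
  -- each outer index i contributes r_i * theta_{k-i} when i ≤ k, else nothing
  have hTi : ∀ i ∈ (List.range (N + 1)).filter (fun i => decide (¬ r.getD i 0 = 0)),
      (fun i => (((((List.range (N + 1 - i)).filter (fun j => decide (¬ θ.getD j 0 = 0))).map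
            (fun j => (i + j, r.getD i 0 * θ.getD j 0))).filter
              (fun p => decide (p.1 = k))).map Prod.snd).sum) i
        = (fun i => if i ≤ k then r.getD i 0 * θ.getD (k - i) 0 else 0) i := by
    intro i hi
    rw [List.mem_filter, List.mem_range] at hi
    simp only
    rw [List.filter_map, List.map_map, List.filter_filter]
    rw [List.filter_congr (q := fun j => decide ((i + j = k) ∧ ¬ θ.getD j 0 = 0))
        (by intro j _
            by_cases h1 : i + j = k <;> by_cases h2 : θ.getD j 0 = 0 <;>
              simp [Function.comp, h1, h2] <;> tauto)]
    rw [← sum_map_ite_filter _ (fun j => (i + j = k) ∧ ¬ θ.getD j 0 = 0)]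
    rw [List.map_congr_left
        (g := fun j => if i + j = k then r.getD i 0 * θ.getD j 0 else 0)
        (by intro j _
            by_cases h1 : i + j = k <;> by_cases h2 : θ.getD j 0 = 0 <;>
              simp [Function.comp, h1, h2] <;> tauto)]
    rw [sum_map_ite_filter _ (fun j => i + j = k), filter_range_add_eq]
    by_cases hik : i ≤ k
    · rw [if_pos ⟨hik, by omega⟩, if_pos hik]
      have : k - i ≤ k := by omega
      simp
    · rw [if_neg (by tauto), if_neg hik]
      rfl
  rw [List.map_congr_left hTi]
  rw [← sum_map_ite_filter _ (fun i => ¬ r.getD i 0 = 0)]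
  rw [List.map_congr_left
      (g := fun i => if i ≤ k then r.getD i 0 * θ.getD (k - i) 0 else 0)
      (by intro i _
          by_cases h1 : r.getD i 0 = 0 <;> by_cases h2 : i ≤ k <;> simp [h1, h2] <;> tauto)]
  rw [show N + 1 = (k + 1) + (N - k) from by omega, List.range_add, List.map_append,
      List.sum_append, List.map_map]
  rw [List.map_congr_left (l := List.range (N - k)) (g := fun _ => (0 : Int))
      (by intro x _
          simp only [Function.comp]
          rw [if_neg (by omega)])]
  rw [List.map_congr_left (l := List.range (k + 1))
      (g := fun i => r.getD i 0 * θ.getD (k - i) 0)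
      (by intro i hi
          rw [List.mem_range] at hi
          rw [if_pos (by omega)])]
  have hz : ((List.range (N - k)).map (fun _ => (0 : Int))).sum = 0 := by simp
  rw [hz, add_zero, sum_map_range_reflect]
  apply congrArg
  apply List.map_congr_left
  intro j hj
  rw [List.mem_range] at hj
  have : k - (k - j) = j := by omega
  rw [this]

-- the convolution sum, with theta evaluated, is B's gather value
theorem gatherLoop_eq (prev : List Int) (n : Nat) (s : Int) (m : Nat) :
    gatherLoop prev n s m =
      s + 2 * ((List.range' m (Nat.sqrt n + 1 - m)).map
        (fun t => prev.getD (n - t * t) 0)).sum := by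
  fun_induction gatherLoop with
  | case1 s m h ih =>
    have hm : m ≤ Nat.sqrt n := (le_sqrt_iff' _ _).mpr h
    rw [show Nat.sqrt n + 1 - m = (Nat.sqrt n + 1 - (m + 1)) + 1 from by omega,
        List.range'_succ, List.map_cons, List.sum_cons, ih]
    ring
  | case2 s m h =>
    have hm : Nat.sqrt n < m := by
      rcases Nat.lt_or_ge (Nat.sqrt n) m with hlt | hge
      · exact hlt
      · have h1 : m * m ≤ Nat.sqrt n * Nat.sqrt n := Nat.mul_le_mul hge hge
        have h2 := sqrt_mul_le n
        omega
    rw [show Nat.sqrt n + 1 - m = 0 from by omega]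
    simp

-- the convolution sum, with theta evaluated, is B's gather value
theorem conv_sum_eq_gather (N k : Nat) (r : List Int) (hk : k ≤ N) :
    ((List.range (k + 1)).map (fun j =>
        r.getD (k - j) 0 *
          (thetaLoop N ((List.replicate (N + 1) (0 : Int)).set 0 1) 1).getD j 0)).sum =
      gatherLoop r k (r.getD k 0) 1 := by
  set θ := thetaLoop N ((List.replicate (N + 1) (0 : Int)).set 0 1) 1 with hθ
  rw [List.map_congr_left
      (g := fun j => (if j = 0 then r.getD k 0 else 0) +
        (if Nat.sqrt j * Nat.sqrt j = j ∧ 1 ≤ j then 2 * r.getD (k - j) 0 else 0))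
      (by intro j hj
          rw [List.mem_range] at hj
          rw [hθ, getD_theta]
          rcases eq_or_ne j 0 with rfl | h0
          · simp
          · rw [if_neg h0]
            by_cases hsq : Nat.sqrt j * Nat.sqrt j = j
            · have hj1 : 1 ≤ j := by omega
              rw [if_pos ⟨hsq, by omega⟩]
              simp [h0, hsq, hj1, mul_comm]
            · rw [if_neg (by tauto)]
              simp [h0, hsq])]
  rw [PySem.List.sum_map_add_int]
  have h1 : ((List.range (k + 1)).map (fun j => if j = 0 then r.getD k 0 else 0)).sum
      = r.getD k 0 := by
    rw [List.range_succ_eq_map, List.map_cons, List.sum_cons, List.map_map]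
    rw [List.map_congr_left (g := fun _ => (0 : Int))
        (by intro x _; simp [Function.comp])]
    simp
  have h2 : ((List.range (k + 1)).map
        (fun j => if Nat.sqrt j * Nat.sqrt j = j ∧ 1 ≤ j then 2 * r.getD (k - j) 0 else 0)).sum
      = 2 * ((List.range' 1 (Nat.sqrt k + 1 - 1)).map (fun t => r.getD (k - t * t) 0)).sum := by
    rw [sum_map_ite_filter _ (fun j => Nat.sqrt j * Nat.sqrt j = j ∧ 1 ≤ j)]
    rw [List.filter_congr (q := fun j =>
          decide (1 ≤ j) && decide (Nat.sqrt j * Nat.sqrt j = j))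
        (by intro j _
            by_cases hsq : Nat.sqrt j * Nat.sqrt j = j <;> by_cases hj1 : 1 ≤ j <;>
              simp [hsq, hj1])]
    rw [← List.filter_filter, filter_sq_range (k + 1) (by omega)]
    simp only [Nat.add_sub_cancel]
    rw [List.range_succ_eq_map, List.map_cons, List.filter_cons]
    rw [show (decide (1 ≤ 0 * 0)) = false from rfl]
    simp only [Bool.false_eq_true, if_false]
    rw [List.map_map, List.filter_eq_self.mpr
        (by intro a ha
            rw [List.mem_map] at ha
            obtain ⟨m, -, rfl⟩ := ha
            exact decide_eq_true (Nat.mul_pos (Nat.succ_pos m) (Nat.succ_pos m)))]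
    rw [List.map_map]
    simp only [Function.comp_def]
    rw [List.sum_map_mul_left, List.range'_eq_map_range, List.map_map]
    apply congrArg
    refine congrArg List.sum (List.map_congr_left ?_)
    intro m _
    simp only [Function.comp_def]
    rw [show Nat.succ m = 1 + m from by omega]
  rw [h1, h2, gatherLoop_eq]

theorem stepB_eq_map (N : Nat) (prev : List Int) :
    stepB N prev = (List.range (N + 1)).map (fun n => gatherLoop prev n (prev.getD n 0) 1) := by
  unfold stepB
  rw [PySem.List.foldl_append_singleton_eq_map]
  simp

theorem length_stepB (N : Nat) (prev : List Int) : (stepB N prev).length = N + 1 := by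
  rw [stepB_eq_map]; simp

-- A's pass equals B's pass on any result list of length N+1
theorem inner_eq (N : Nat) (r : List Int) (hr : r.length = N + 1) :
    innerA (thetaLoop N ((List.replicate (N + 1) (0 : Int)).set 0 1) 1) N r = stepB N r := by
  have hlenA : (innerA (thetaLoop N ((List.replicate (N + 1) (0 : Int)).set 0 1) 1) N r).length
      = N + 1 := by
    rw [innerA_eq_pairs, length_foldl_updAdd]; simp
  apply List.ext_getElem (by rw [hlenA, length_stepB])
  intro k h1 h2
  have hk : k ≤ N := by rw [hlenA] at h1; omega
  have hA := getD_innerA N k r hr hk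
  have hB : (stepB N r).getD k 0 = gatherLoop r k (r.getD k 0) 1 := by
    rw [stepB_eq_map, List.getD_eq_getElem?_getD]
    simp [Nat.lt_succ_of_le hk]
  rw [← List.getD_eq_getElem _ 0 h1, ← List.getD_eq_getElem _ 0 h2, hA, hB,
      conv_sum_eq_gather N k r hk]

-- the d-fold iteration agrees step by step
theorem outer_eq (N : Nat) (L : List Int) :
    ∀ init : List Int, init.length = N + 1 →
      L.foldl (fun result _ =>
          innerA (thetaLoop N ((List.replicate (N + 1) (0 : Int)).set 0 1) 1) N result) init =
        L.foldl (fun result _ => stepB N result) init := by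
  induction L with
  | nil => intro init _; rfl
  | cons x xs ih =>
    intro init hinit
    rw [List.foldl_cons, List.foldl_cons, inner_eq N init hinit,
        ih (stepB N init) (length_stepB N init)]

-- ===== VERDICT (by name: the statement is the Claim_ definition above) =====
theorem r_squares_fast_spec : Claim_equal_r_squares_fast := by
  intro d n_max _hD _hPre
  unfold Spec_r_squares_fast r_squares_fast r_squares_fast_alt
  have hinit : (List.replicate (n_max.toNat + 1) (0 : Int)).set 0 1
      = 1 :: List.replicate n_max.toNat 0 := by simp [List.replicate_succ]
  simp only [hinit]
  exact outer_eq n_max.toNat (PySem.List.pyRange 0 d 1) _ (by simp)
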